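-- pv_equiv track=rewrite | github.com/raunakpalewar/ai-video-generation | myproject/main/views.py | calculate_start_time
-- ===== SOURCE A (Python) =====
-- def calculate_start_time(sequence_list, duration_list):
--     sequence_start_times = {}
--     start_times = []
--
--     for i, sequence in enumerate(sequence_list):
--         if sequence not in sequence_start_times:
--             sequence_start_times[sequence] = 0
--
--         start_time = sequence_start_times[sequence]
--         sequence_start_times[sequence] += duration_list[i]
--
--         start_times.append(start_time)
--
--     return start_times
-- ===== SOURCE B (Python) =====
-- def calculate_start_time(sequence_list, duration_list):
--     # Each element's start time is the sum of durations of earlier items in the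
--     # same sequence group: a direct grouped-prefix-sum, no running dict needed.
--     return [
--         sum(d for s, d in zip(sequence_list[:i], duration_list) if s == sequence_list[i])
--         for i in range(len(sequence_list))
--     ]
-- ===== Notes on version B (the rewrite author's own statement) =====
-- stated objective: simpler
-- what changed: B replaces A's stateful single pass with a per-key running-total dict by a direct grouped-prefix-sum comprehension: each start time is the sum of durations of earlier same-sequence items.
import Mathlib
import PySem

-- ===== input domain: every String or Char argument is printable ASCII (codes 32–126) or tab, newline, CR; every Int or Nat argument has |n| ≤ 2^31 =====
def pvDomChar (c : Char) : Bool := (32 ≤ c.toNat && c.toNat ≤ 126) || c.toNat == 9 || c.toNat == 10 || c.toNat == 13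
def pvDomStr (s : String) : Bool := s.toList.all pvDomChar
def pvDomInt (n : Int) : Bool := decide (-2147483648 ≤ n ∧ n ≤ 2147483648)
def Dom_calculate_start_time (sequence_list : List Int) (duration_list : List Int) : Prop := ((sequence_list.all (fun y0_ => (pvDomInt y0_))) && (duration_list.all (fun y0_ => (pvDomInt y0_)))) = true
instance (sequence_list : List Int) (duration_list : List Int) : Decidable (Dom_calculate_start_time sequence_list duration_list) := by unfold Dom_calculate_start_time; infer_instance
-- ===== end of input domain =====

-- B computes each start time directly as the grouped prefix sum of earlier same-sequence
-- durations (simpler decomposition); A keeps a running-total dict in one pass.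


-- ===== PORT A =====
def calculate_start_time (sequence_list : List Int) (duration_list : List Int) : List Int :=
  ((PySem.List.enumerate sequence_list 0).foldl
    (fun (st : PySem.Dict Int Int × List Int) p =>
      let d := if (st.1.get? p.2).isNone then st.1.insert p.2 0 else st.1
      let start_time := d.getD p.2 0
      let d := d.insert p.2 (start_time + PySem.List.pyGetD duration_list p.1 0)
      (d, st.2 ++ [start_time]))
    (PySem.Dict.empty, [])).2

-- ===== PORT B =====
def calculate_start_time_alt (sequence_list : List Int) (duration_list : List Int) : List Int :=
  (PySem.List.pyRange 0 sequence_list.length 1).map (fun i =>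
    ((PySem.List.slice sequence_list none (some i)).zip duration_list).foldl
      (fun acc p => if p.1 = PySem.List.pyGetD sequence_list i 0 then acc + p.2 else acc) 0)

-- ===== PRECONDITION & SPEC =====
-- Pre_ excludes exactly the inputs where A raises IndexError at duration_list[i].
def Pre_calculate_start_time (sequence_list : List Int) (duration_list : List Int) : Prop :=
  sequence_list.length ≤ duration_list.length
instance (sequence_list : List Int) (duration_list : List Int) : Decidable (Pre_calculate_start_time sequence_list duration_list) := by unfold Pre_calculate_start_time; infer_instance
def pvWitness_calculate_start_time : List Int × List Int := ([1, 2, 1, 2, 1], [3, 4, 5, 6, 7])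

def Spec_calculate_start_time (sequence_list : List Int) (duration_list : List Int) (out : List Int) : Prop := out = calculate_start_time_alt sequence_list duration_list
instance (sequence_list : List Int) (duration_list : List Int) (out : List Int) : Decidable (Spec_calculate_start_time sequence_list duration_list out) := by unfold Spec_calculate_start_time; infer_instance

-- ===== CLAIM (what is proved, stated in full; the proofs are below) =====
def Claim_equal_calculate_start_time : Prop := ∀ (sequence_list : List Int) (duration_list : List Int), Dom_calculate_start_time sequence_list duration_list → Pre_calculate_start_time sequence_list duration_list → Spec_calculate_start_time sequence_list duration_list (calculate_start_time sequence_list duration_list)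

-- ===== LEMMAS AND PROOFS =====

-- Ghost (proof-only) reformulations: B's per-index value and A's dict invariant.
def pvBVal (seq dur : List Int) (i : Nat) : Int :=
  ((seq.take i).zip dur).foldl (fun acc p => if p.1 = seq.getD i 0 then acc + p.2 else acc) 0

def pvSumFor (seq dur : List Int) (s : Int) : Int :=
  (seq.zip dur).foldl (fun a p => if p.1 = s then a + p.2 else a) 0

def pvStep (dur : List Int) (st : PySem.Dict Int Int × List Int) (p : Int × Int) :
    PySem.Dict Int Int × List Int :=
  let d := if (st.1.get? p.2).isNone then st.1.insert p.2 0 else st.1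
  let start_time := d.getD p.2 0
  let d := d.insert p.2 (start_time + PySem.List.pyGetD dur p.1 0)
  (d, st.2 ++ [start_time])

lemma pvZipTakeLen {α β : Type} (xs : List α) (ys : List β) :
    xs.zip (ys.take xs.length) = xs.zip ys := by
  induction xs generalizing ys with
  | nil => simp
  | cons x xs ih =>
    cases ys with
    | nil => simp
    | cons y ys => simpa [List.zip] using ih ys

lemma pvZipSnoc (xs : List Int) (x : Int) (dur : List Int) (h : xs.length < dur.length) :
    (xs ++ [x]).zip dur = xs.zip dur ++ [(x, dur.getD xs.length 0)] := by
  have hdrop : List.drop xs.length dur = dur[xs.length] :: List.drop (xs.length + 1) dur :=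
    List.drop_eq_getElem_cons h
  have hg : dur.getD xs.length 0 = dur[xs.length] := by
    simp [List.getD, List.getElem?_eq_getElem h]
  conv_lhs => rw [← List.take_append_drop xs.length dur]
  rw [List.zip_append (by simp; omega), pvZipTakeLen, hdrop, hg]
  rfl

lemma pvGetDCond (d : PySem.Dict Int Int) (x s : Int) :
    (if (d.get? x).isNone then d.insert x 0 else d).getD s 0 = d.getD s 0 := by
  rcases hx : d.get? x with _ | v
  · simp only [Option.isNone_none, if_true]
    rw [PySem.Dict.getD_insert]
    split_ifs with hs
    · subst hs; simp [PySem.Dict.getD_eq_get?_getD, hx]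
    · rfl
  · simp

lemma pvSumForSnoc (xs : List Int) (x s : Int) (dur : List Int) (h : xs.length < dur.length) :
    pvSumFor (xs ++ [x]) dur s
      = if x = s then pvSumFor xs dur s + dur.getD xs.length 0 else pvSumFor xs dur s := by
  unfold pvSumFor
  rw [pvZipSnoc xs x dur h, List.foldl_append]
  simp

lemma pvBValSnocLt (xs : List Int) (x : Int) (dur : List Int) (i : Nat) (h : i < xs.length) :
    pvBVal (xs ++ [x]) dur i = pvBVal xs dur i := by
  unfold pvBVal
  rw [List.take_append_of_le_length (le_of_lt h)]
  have : (xs ++ [x]).getD i 0 = xs.getD i 0 := by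
    simp [List.getD, List.getElem?_append_left h]
  rw [this]

lemma pvBValSnocLast (xs : List Int) (x : Int) (dur : List Int) :
    pvBVal (xs ++ [x]) dur xs.length = pvSumFor xs dur x := by
  unfold pvBVal pvSumFor
  rw [List.take_left]
  have : (xs ++ [x]).getD xs.length 0 = x := by
    simp [List.getD]
  rw [this]

lemma pvMain (dur : List Int) (xs : List Int) (hlen : xs.length ≤ dur.length) :
    ((PySem.List.enumerate xs 0).foldl (pvStep dur) (PySem.Dict.empty, [])).2
        = (List.range xs.length).map (pvBVal xs dur)
      ∧ ∀ s, ((PySem.List.enumerate xs 0).foldl (pvStep dur) (PySem.Dict.empty, [])).1.getD s 0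
        = pvSumFor xs dur s := by
  induction xs using List.reverseRecOn with
  | nil => exact ⟨by simp [PySem.List.enumerate], fun s => by simp [PySem.List.enumerate, pvSumFor, PySem.Dict.getD_empty]⟩
  | append_singleton xs x ih =>
    have hx : xs.length < dur.length := by simp at hlen; omega
    obtain ⟨ih1, ih2⟩ := ih (le_of_lt hx)
    rw [PySem.List.enumerate_append, List.foldl_append]
    set st := (PySem.List.enumerate xs 0).foldl (pvStep dur) (PySem.Dict.empty, []) with hst
    have hstep : (PySem.List.enumerate [x] (0 + (xs.length : Int))).foldl (pvStep dur) st
        = pvStep dur st (0 + (xs.length : Int), x) := by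
      simp [PySem.List.enumerate]
    rw [hstep]
    unfold pvStep
    simp only [zero_add]
    constructor
    · show st.2 ++ [(if (st.1.get? x).isNone then st.1.insert x 0 else st.1).getD x 0]
          = (List.range (xs ++ [x]).length).map (pvBVal (xs ++ [x]) dur)
      rw [pvGetDCond, ih2 x, ih1]
      simp only [List.length_append, List.length_singleton, List.range_succ, List.map_append,
        List.map_cons, List.map_nil]
      congr 1
      · exact (List.map_congr_left fun i hi =>
          (pvBValSnocLt xs x dur i (List.mem_range.mp hi)).symm)
      · rw [pvBValSnocLast]
    · intro s
      show ((if (st.1.get? x).isNone then st.1.insert x 0 else st.1).insert x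
              ((if (st.1.get? x).isNone then st.1.insert x 0 else st.1).getD x 0
                + PySem.List.pyGetD dur (xs.length : Int) 0)).getD s 0
          = pvSumFor (xs ++ [x]) dur s
      rw [PySem.Dict.getD_insert, pvGetDCond, ih2 x,
        PySem.List.pyGetD_natCast, pvSumForSnoc xs x s dur hx]
      by_cases hsx : s = x
      · subst hsx; simp
      · rw [if_neg hsx, pvGetDCond, ih2 s, if_neg (fun hh : x = s => hsx hh.symm)]

lemma pvAltEq (seq dur : List Int) :
    calculate_start_time_alt seq dur = (List.range seq.length).map (pvBVal seq dur) := by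
  unfold calculate_start_time_alt
  rw [PySem.List.pyRange_one]
  simp only [Int.sub_zero, Int.toNat_natCast, List.map_map]
  refine List.map_congr_left fun k _ => ?_
  simp [Function.comp, PySem.List.slice_to_natCast, PySem.List.pyGetD_natCast, pvBVal]

-- ===== VERDICT (by name: the statement is the Claim_ definition above) =====
theorem calculate_start_time_spec : Claim_equal_calculate_start_time := by
  intro seq dur _ hpre
  unfold Spec_calculate_start_time
  have hA : calculate_start_time seq dur
      = ((PySem.List.enumerate seq 0).foldl (pvStep dur) (PySem.Dict.empty, [])).2 := rfl
  rw [hA, (pvMain dur seq hpre).1, pvAltEq]
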